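-- pv_equiv track=rewrite | github.com/zhangruochi/leetcode | 249/Solution.py | is_shift
-- ===== SOURCE A (Python) =====
-- def is_shift(a,b):
--     if not a or not b or len(a) != len(b):
--         return False
--
--     if len(a) == 1 and len(b) == 1:
--         return True
--
--     base = (ord(a[0]) - ord(b[0])) % 26
--
--     for char_a,char_b in zip(a,b):
--         if (ord(char_a) - ord(char_b))%26 != base:
--             return False
--
--     return True
-- ===== SOURCE B (Python) =====
-- def is_shift(a, b):
--     if not a or not b:
--         return False
--
--     def canon(s):
--         return [(ord(c) - ord(s[0])) % 26 for c in s]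
--
--     return canon(a) == canon(b)
-- ===== Notes on version B (the rewrite author's own statement) =====
-- stated objective: alternative
-- what changed: Instead of comparing per-position differences of the two strings against a base in one zip pass, B normalizes each string independently to a shift-invariant canonical list ((ord(c)-ord(s[0]))%26 for each char) and compares the two canonical lists for equality; the length guard and single-character special case disappear (unequal lengths give unequal lists, a singleton gives [0]==[0]).
import Mathlib
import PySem

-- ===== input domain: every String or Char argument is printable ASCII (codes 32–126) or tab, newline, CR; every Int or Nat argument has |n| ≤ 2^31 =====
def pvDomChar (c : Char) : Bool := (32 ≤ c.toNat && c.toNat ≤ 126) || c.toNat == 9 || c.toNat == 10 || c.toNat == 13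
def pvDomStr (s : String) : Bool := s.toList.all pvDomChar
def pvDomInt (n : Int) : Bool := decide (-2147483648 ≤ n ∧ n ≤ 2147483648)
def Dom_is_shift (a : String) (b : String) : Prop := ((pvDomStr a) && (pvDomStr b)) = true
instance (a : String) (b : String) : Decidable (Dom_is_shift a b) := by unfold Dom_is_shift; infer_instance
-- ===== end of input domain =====

-- B normalizes each string independently to a shift-invariant canonical difference list and
-- compares the two lists, instead of A's base-value comparison in one zip pass (objective: alternative).

-- ===== PORT A =====
-- the 'for char_a, char_b in zip(a,b)' loop with its early 'return False'
def isShiftLoopA (base : Int) : List (Char × Char) → Bool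
  | [] => true
  | (x, y) :: rest =>
      if PySem.Int.mod ((x.toNat : Int) - (y.toNat : Int)) 26 ≠ base then false
      else isShiftLoopA base rest

-- A's body over the character lists of a and b
def isShiftListA (la lb : List Char) : Bool :=
  if la.length == 0 || lb.length == 0 || la.length != lb.length then false
  else if la.length == 1 && lb.length == 1 then true
  else
    let base := PySem.Int.mod ((la.headI.toNat : Int) - (lb.headI.toNat : Int)) 26
    isShiftLoopA base (la.zip lb)

def is_shift (a : String) (b : String) : Bool :=
  isShiftListA a.toList b.toList

-- ===== PORT B =====
-- B's canon(s): per-character shift relative to the string's own first character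
def canonB (l : List Char) : List Int :=
  l.map (fun c => PySem.Int.mod ((c.toNat : Int) - (l.headI.toNat : Int)) 26)

def is_shift_alt (a : String) (b : String) : Bool :=
  if a.toList.length == 0 || b.toList.length == 0 then false
  else canonB a.toList == canonB b.toList

-- ===== PRECONDITION & SPEC =====
def Spec_is_shift (a : String) (b : String) (out : Bool) : Prop := out = is_shift_alt a b
instance (a : String) (b : String) (out : Bool) : Decidable (Spec_is_shift a b out) := by unfold Spec_is_shift; infer_instance

-- ===== CLAIM (what is proved, stated in full; the proofs are below) =====
def Claim_equal_is_shift : Prop := ∀ (a : String) (b : String), Dom_is_shift a b → Spec_is_shift a b (is_shift a b)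

-- ===== LEMMAS AND PROOFS =====

-- for the positive literal divisor 26, Python's mod is Lean's emod
theorem mod26 (z : Int) : PySem.Int.mod z 26 = z % 26 :=
  PySem.Int.mod_eq_emod_of_pos (by norm_num)

-- A's loop is 'all diffs equal base'
theorem isShiftLoopA_eq_all (base : Int) (l : List (Char × Char)) :
    isShiftLoopA base l
      = decide (∀ p ∈ l, ((p.1.toNat : Int) - (p.2.toNat : Int)) % 26 = base) := by
  induction l with
  | nil => simp [isShiftLoopA]
  | cons p rest ih =>
      obtain ⟨x, y⟩ := p
      by_cases h : ((x.toNat : Int) - (y.toNat : Int)) % 26 = base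
      · simp [isShiftLoopA, h, ih]
      · simp [isShiftLoopA, h]

-- canonical lists over equal-length tails coincide iff every zipped pair shifts by the base
theorem canon_tail_iff (x y : Char) (la lb : List Char) (hlen : la.length = lb.length) :
    (la.map (fun c => ((c.toNat : Int) - (x.toNat : Int)) % 26)
       = lb.map (fun c => ((c.toNat : Int) - (y.toNat : Int)) % 26))
      ↔ (∀ p ∈ la.zip lb,
          ((p.1.toNat : Int) - (p.2.toNat : Int)) % 26
            = ((x.toNat : Int) - (y.toNat : Int)) % 26) := by
  induction la generalizing lb with
  | nil =>
      cases lb with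
      | nil => simp
      | cons _ _ => simp at hlen
  | cons c la' ih =>
      cases lb with
      | nil => simp at hlen
      | cons d lb' =>
          simp only [List.length_cons, Nat.succ_inj] at hlen
          simp only [List.map_cons, List.zip_cons_cons, List.cons.injEq,
            List.forall_mem_cons, ih lb' hlen]
          constructor
          · rintro ⟨h1, h2⟩; exact ⟨by omega, h2⟩
          · rintro ⟨h1, h2⟩; exact ⟨by omega, h2⟩

theorem isShiftList_eq (la lb : List Char) :
    isShiftListA la lb
      = (if la.length == 0 || lb.length == 0 then false else canonB la == canonB lb) := by
  unfold isShiftListA canonB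
  rcases la with _ | ⟨x, la'⟩
  · simp
  rcases lb with _ | ⟨y, lb'⟩
  · simp
  simp only [List.length_cons, List.headI]
  have hgB : ((la'.length + 1 == 0 || lb'.length + 1 == 0)) = false := by simp
  rw [hgB]
  simp only [Bool.false_eq_true, if_false]
  by_cases hlen : la'.length = lb'.length
  · rw [show ((false || la'.length + 1 != lb'.length + 1)) = false from by simp [hlen]]
    simp only [Bool.false_eq_true, if_false]
    by_cases h1 : (la'.length + 1 == 1 && lb'.length + 1 == 1) = true
    · -- single characters: canon lists are both [0]
      rw [if_pos h1]
      simp only [Bool.and_eq_true, beq_iff_eq, Nat.add_eq_right] at h1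
      obtain ⟨ha, hb⟩ := h1
      have hla : la' = [] := List.length_eq_zero_iff.mp ha
      have hlb : lb' = [] := List.length_eq_zero_iff.mp hb
      subst hla; subst hlb
      simp
    · rw [if_neg h1]
      rw [Bool.eq_iff_iff]
      simp only [isShiftLoopA_eq_all, mod26, decide_eq_true_eq, beq_iff_eq,
        List.zip_cons_cons, List.map_cons, List.forall_mem_cons, List.cons.injEq]
      rw [canon_tail_iff x y la' lb' hlen]
      constructor
      · rintro ⟨-, h⟩; exact ⟨by omega, h⟩
      · rintro ⟨-, h⟩; exact ⟨trivial, h⟩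
  · -- length mismatch: A's guard fails; B's lists have different lengths
    rw [show ((false || la'.length + 1 != lb'.length + 1)) = true from by simp; omega]
    simp only [if_true]
    symm
    rw [beq_eq_false_iff_ne]
    intro h
    have := congrArg List.length h
    simp at this
    omega

-- ===== VERDICT (by name: the statement is the Claim_ definition above) =====
theorem is_shift_spec : Claim_equal_is_shift := by
  intro a b _
  unfold Spec_is_shift is_shift is_shift_alt
  exact isShiftList_eq a.toList b.toList
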